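-- pv_equiv track=rewrite | github.com/miliar/Code_Jam_Webscraper | solutions_python/Problem_210/273.py | case_solver
-- ===== SOURCE A (Python) =====
-- def case_solver(tc, N=None, P=None, I=None, T=None, S=None, **kwargs):
--     AC, AJ = P
--     I = [(b, e, i < AC) for i, (b, e) in enumerate(I)]
--     I.sort()
--     res = 4
--     for cb in range(720):
--         ce = cb + 720
--         for p in [True, False]:
--             if all(p!=bp or (b>=cb and e<=ce) for b, e, bp in I)\
--                 and all(p==bp or (e<=cb or b>=ce) for b, e, bp in I):
--                 res = 2
--
--     return 'Case #{:d}: {}'.format(tc, res)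
-- ===== SOURCE B (Python) =====
-- def case_solver(tc, N=None, P=None, I=None, T=None, S=None, **kwargs):
--     AC, AJ = P
--     flagged = [(b, e, i < AC) for i, (b, e) in enumerate(I)]
--     res = 4
--     for p in (True, False):
--         mine = [(b, e) for b, e, bp in flagged if bp == p]
--         others = [(b, e) for b, e, bp in flagged if bp != p]
--         lo = 0
--         for _, e in mine:
--             lo = max(lo, e - 720)
--         candidates = [lo] + [e for _, e in others]
--         for cb in candidates:
--             if 0 <= cb <= 719 \
--                and all(b >= cb and e <= cb + 720 for b, e in mine) \
--                and all(e <= cb or b >= cb + 720 for b, e in others):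
--                 res = 2
--                 break
--     return 'Case #{:d}: {}'.format(tc, res)
-- ===== Notes on version B (the rewrite author's own statement) =====
-- stated objective: faster
-- what changed: Instead of scanning all 720 window offsets and re-testing every interval at each, B tests only the O(N) candidate window starts (the group's lower bound and each opposite-group end time), since the minimal feasible window start must be one of them.
import Mathlib
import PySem

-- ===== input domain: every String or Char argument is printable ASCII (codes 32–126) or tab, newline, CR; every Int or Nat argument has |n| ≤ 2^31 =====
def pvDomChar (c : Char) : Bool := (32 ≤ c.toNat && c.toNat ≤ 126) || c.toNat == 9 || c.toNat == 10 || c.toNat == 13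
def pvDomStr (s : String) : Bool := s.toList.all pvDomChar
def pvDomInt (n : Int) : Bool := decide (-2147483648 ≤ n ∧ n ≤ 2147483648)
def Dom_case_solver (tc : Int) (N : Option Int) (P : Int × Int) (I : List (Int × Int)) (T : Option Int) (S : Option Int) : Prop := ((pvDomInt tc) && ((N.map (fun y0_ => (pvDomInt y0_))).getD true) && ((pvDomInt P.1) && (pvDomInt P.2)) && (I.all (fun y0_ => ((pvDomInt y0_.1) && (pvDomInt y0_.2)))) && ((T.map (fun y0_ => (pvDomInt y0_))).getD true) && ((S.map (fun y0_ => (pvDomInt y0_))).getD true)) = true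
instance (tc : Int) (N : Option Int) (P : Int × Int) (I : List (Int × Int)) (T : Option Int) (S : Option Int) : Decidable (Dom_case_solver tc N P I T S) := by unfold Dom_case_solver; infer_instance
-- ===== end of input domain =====

-- ===== PORT A =====
-- B changes the search: only the O(N) candidate window starts are tested instead of all 720 offsets (objective: faster; measured).
-- Port of A. I.sort() is ported with a lexicographic integer-triple key; the sort order never
-- affects the result (the two `all` tests are permutation-invariant), so any stable order is exact here.
def case_solver (tc : Int) (N : Option Int) (P : Int × Int) (I : List (Int × Int)) (T : Option Int) (S : Option Int) : String :=
  let AC := P.1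
  let I1 : List (Int × Int × Bool) :=
    (PySem.List.enumerate I 0).map (fun q => (q.2.1, q.2.2, decide (q.1 < AC)))
  let I2 := PySem.List.sorted I1 (fun t => toLex (t.1, toLex (t.2.1, (if t.2.2 then (1:Int) else 0)))) false
  let res : Int :=
    (PySem.List.pyRange 0 720 1).foldl (fun res cb =>
      let ce := cb + 720
      [true, false].foldl (fun res p =>
        if (I2.all fun t => (p != t.2.2) || (decide (t.1 ≥ cb) && decide (t.2.1 ≤ ce)))
            && (I2.all fun t => (p == t.2.2) || (decide (t.2.1 ≤ cb) || decide (t.1 ≥ ce)))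
        then 2 else res) res) 4
  "Case #" ++ PySem.Int.toStr tc ++ ": " ++ PySem.Int.toStr res

-- ===== PORT B =====
def case_solver_alt (tc : Int) (N : Option Int) (P : Int × Int) (I : List (Int × Int)) (T : Option Int) (S : Option Int) : String :=
  let AC := P.1
  let flagged : List (Int × Int × Bool) :=
    (PySem.List.enumerate I 0).map (fun q => (q.2.1, q.2.2, decide (q.1 < AC)))
  let res : Int :=
    [true, false].foldl (fun res p =>
      let mine := (flagged.filter (fun t => t.2.2 == p)).map (fun t => (t.1, t.2.1))
      let others := (flagged.filter (fun t => t.2.2 != p)).map (fun t => (t.1, t.2.1))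
      let lo := mine.foldl (fun lo be => max lo (be.2 - 720)) 0
      let candidates := lo :: others.map (fun be => be.2)
      if candidates.any (fun cb =>
          decide (0 ≤ cb) && decide (cb ≤ 719)
          && (mine.all fun be => decide (be.1 ≥ cb) && decide (be.2 ≤ cb + 720))
          && (others.all fun be => decide (be.2 ≤ cb) || decide (be.1 ≥ cb + 720)))
      then 2 else res) 4
  "Case #" ++ PySem.Int.toStr tc ++ ": " ++ PySem.Int.toStr res


-- ===== PRECONDITION & SPEC =====
def Spec_case_solver (tc : Int) (N : Option Int) (P : Int × Int) (I : List (Int × Int)) (T : Option Int) (S : Option Int) (out : String) : Prop := out = case_solver_alt tc N P I T S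
instance (tc : Int) (N : Option Int) (P : Int × Int) (I : List (Int × Int)) (T : Option Int) (S : Option Int) (out : String) : Decidable (Spec_case_solver tc N P I T S out) := by unfold Spec_case_solver; infer_instance

-- ===== CLAIM (what is proved, stated in full; the proofs are below) =====
def Claim_equal_case_solver : Prop := ∀ (tc : Int) (N : Option Int) (P : Int × Int) (I : List (Int × Int)) (T : Option Int) (S : Option Int), Dom_case_solver tc N P I T S → Spec_case_solver tc N P I T S (case_solver tc N P I T S)

-- ===== LEMMAS AND PROOFS =====

-- Feasibility of window start cb for group p over the flagged interval list L: exactly the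
-- condition both programs test (window [cb, cb+720] contains the p-group, excludes the rest).
def Feas (L : List (Int × Int × Bool)) (p : Bool) (cb : Int) : Prop :=
  0 ≤ cb ∧ cb ≤ 719 ∧
    ∀ t ∈ L, (t.2.2 = p → cb ≤ t.1 ∧ t.2.1 ≤ cb + 720) ∧
             (t.2.2 ≠ p → t.2.1 ≤ cb ∨ cb + 720 ≤ t.1)

def loOf (L : List (Int × Int × Bool)) (p : Bool) : Int :=
  ((L.filter (fun t => t.2.2 == p)).map (fun t => (t.1, t.2.1))).foldl
    (fun lo be => max lo (be.2 - 720)) 0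

def candOf (L : List (Int × Int × Bool)) (p : Bool) : List Int :=
  loOf L p :: ((L.filter (fun t => t.2.2 != p)).map (fun t => (t.1, t.2.1))).map (fun be => be.2)

-- a foldl with body 'if q x then 2 else r' is an any-test
theorem foldl_if_two {α : Type} (q : α → Bool) (xs : List α) (init : Int) :
    xs.foldl (fun r x => if q x then 2 else r) init = if xs.any q then 2 else init := by
  induction xs generalizing init with
  | nil => simp
  | cons x xs ih => by_cases h : q x <;> simp [h, ih]

theorem foldl_max_le_iff (xs : List (Int × Int)) (a c : Int) :
    xs.foldl (fun lo be => max lo (be.2 - 720)) a ≤ c ↔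
      a ≤ c ∧ ∀ be ∈ xs, be.2 - 720 ≤ c := by
  induction xs generalizing a with
  | nil => simp
  | cons x xs ih => simp [ih]; tauto

theorem lo_le_of_feas (L : List (Int × Int × Bool)) (p : Bool) (cb : Int)
    (h : Feas L p cb) : loOf L p ≤ cb := by
  rcases h with ⟨h0, _, hall⟩
  rw [loOf, foldl_max_le_iff]
  refine ⟨h0, ?_⟩
  intro be hbe
  simp only [List.mem_map, List.mem_filter, beq_iff_eq] at hbe
  rcases hbe with ⟨t, ⟨ht, htp⟩, rfl⟩
  have := ((hall t ht).1 htp).2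
  omega

theorem feas_step (L : List (Int × Int × Bool)) (p : Bool) (cb : Int)
    (h : Feas L p cb) (h1 : cb ∉ candOf L p) : Feas L p (cb - 1) ∧ 1 ≤ cb := by
  have hlo : loOf L p ≤ cb := lo_le_of_feas L p cb h
  have hne : cb ≠ loOf L p := by intro e; exact h1 (e ▸ List.mem_cons_self ..)
  have hE : ∀ t ∈ L, t.2.2 ≠ p → t.2.1 ≠ cb := by
    intro t ht htp he
    apply h1
    rw [candOf]
    refine List.mem_cons_of_mem _ ?_
    simp only [List.mem_map, List.mem_filter, bne_iff_ne]
    exact ⟨(t.1, t.2.1), ⟨t, ⟨ht, htp⟩, rfl⟩, he⟩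
  rcases h with ⟨h0, h719, hall⟩
  have hcb1 : loOf L p < cb := lt_of_le_of_ne hlo (Ne.symm hne)
  have hlo0 : (0:Int) ≤ loOf L p := by
    have := (foldl_max_le_iff _ 0 (loOf L p)).mp (le_refl _)
    exact this.1
  refine ⟨⟨by omega, by omega, ?_⟩, by omega⟩
  intro t ht
  have hm := hall t ht
  constructor
  · intro htp
    have h2 := hm.1 htp
    have hle : t.2.1 - 720 ≤ loOf L p := by
      rw [loOf] at hcb1 ⊢
      by_contra hc
      push Not at hc
      have := (foldl_max_le_iff ((L.filter (fun t => t.2.2 == p)).map (fun t => (t.1, t.2.1))) 0 (loOf L p)).mp (le_refl _)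
      rw [loOf] at this
      have := this.2 (t.1, t.2.1) (by
        simp only [List.mem_map, List.mem_filter, beq_iff_eq]
        exact ⟨t, ⟨ht, htp⟩, rfl⟩)
      simp at this
      omega
    constructor
    · omega
    · omega
  · intro htp
    rcases hm.2 htp with h2 | h2
    · left; have := hE t ht htp; omega
    · right; omega

theorem exists_feas_candidate (L : List (Int × Int × Bool)) (p : Bool) :
    ∀ (n : Nat) (cb : Int), cb.toNat = n → Feas L p cb →
      ∃ c ∈ candOf L p, Feas L p c := by
  intro n
  induction n using Nat.strong_induction_on with
  | _ n ih =>
    intro cb hn hf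
    by_cases hc : cb ∈ candOf L p
    · exact ⟨cb, hc, hf⟩
    · obtain ⟨hf1, h1⟩ := feas_step L p cb hf hc
      have h0 : 0 ≤ cb := hf.1
      exact ih (cb - 1).toNat (by omega) (cb - 1) rfl hf1

theorem A_iff_feas {k : Type} [LT k] [DecidableLT k] (L : List (Int × Int × Bool)) (key : (Int × Int × Bool) → k) (p : Bool) (cb : Int)
    (h0 : 0 ≤ cb) (h719 : cb ≤ 719) :
    (((PySem.List.sorted L key false).all fun t => (p != t.2.2) || (decide (t.1 ≥ cb) && decide (t.2.1 ≤ cb + 720))) &&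
     ((PySem.List.sorted L key false).all fun t => (p == t.2.2) || (decide (t.2.1 ≤ cb) || decide (t.1 ≥ cb + 720)))) = true
    ↔ Feas L p cb := by
  simp only [Bool.and_eq_true, List.all_eq_true, PySem.List.mem_sorted, Bool.or_eq_true,
    bne_iff_ne, beq_iff_eq, Bool.and_eq_true, decide_eq_true_iff, Feas]
  constructor
  · rintro ⟨H1, H2⟩
    refine ⟨h0, h719, fun t ht => ⟨fun htp => ?_, fun htp => ?_⟩⟩
    · rcases H1 t ht with h | h
      · exact absurd htp.symm h
      · exact ⟨by omega, by omega⟩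
    · rcases H2 t ht with h | h
      · exact absurd h.symm htp
      · omega
  · rintro ⟨-, -, H⟩
    constructor
    · intro t ht
      by_cases htp : t.2.2 = p
      · have := (H t ht).1 htp; right; exact ⟨by omega, by omega⟩
      · left; exact fun e => htp e.symm
    · intro t ht
      by_cases htp : t.2.2 = p
      · left; exact htp.symm
      · have := (H t ht).2 htp; right; omega

theorem B_iff_feas (L : List (Int × Int × Bool)) (p : Bool) (cb : Int) :
    (decide (0 ≤ cb) && decide (cb ≤ 719)
      && (((L.filter (fun t => t.2.2 == p)).map (fun t => (t.1, t.2.1))).all fun be => decide (be.1 ≥ cb) && decide (be.2 ≤ cb + 720))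
      && (((L.filter (fun t => t.2.2 != p)).map (fun t => (t.1, t.2.1))).all fun be => decide (be.2 ≤ cb) || decide (be.1 ≥ cb + 720))) = true
    ↔ Feas L p cb := by
  simp only [Bool.and_eq_true, List.all_eq_true, List.mem_map, List.mem_filter, Bool.or_eq_true,
    bne_iff_ne, beq_iff_eq, decide_eq_true_iff, Feas]
  constructor
  · rintro ⟨⟨⟨h0, h719⟩, H1⟩, H2⟩
    refine ⟨h0, h719, fun t ht => ⟨fun htp => ?_, fun htp => ?_⟩⟩
    · have := H1 (t.1, t.2.1) ⟨t, ⟨ht, htp⟩, rfl⟩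
      exact ⟨by omega, by omega⟩
    · have := H2 (t.1, t.2.1) ⟨t, ⟨ht, htp⟩, rfl⟩
      omega
  · rintro ⟨h0, h719, H⟩
    refine ⟨⟨⟨h0, h719⟩, ?_⟩, ?_⟩
    · rintro be ⟨t, ⟨ht, htp⟩, rfl⟩
      have := (H t ht).1 htp
      exact ⟨by omega, by omega⟩
    · rintro be ⟨t, ⟨ht, htp⟩, rfl⟩
      exact (H t ht).2 htp

-- ===== VERDICT (by name: the statement is the Claim_ definition above) =====
set_option maxRecDepth 4000 in
theorem case_solver_spec : Claim_equal_case_solver := by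
  unfold Claim_equal_case_solver
  intro tc N P I T S _
  unfold Spec_case_solver case_solver case_solver_alt
  simp only [foldl_if_two]
  congr 2
  refine if_congr ?_ rfl rfl
  simp only [List.any_eq_true, PySem.List.mem_pyRange_one, List.mem_cons, List.not_mem_nil, or_false]
  set L := (PySem.List.enumerate I 0).map (fun q => (q.2.1, q.2.2, decide (q.1 < P.1))) with hL
  constructor
  · rintro ⟨cb, ⟨hcb0, hcb720⟩, p, -, hA⟩
    have hf : Feas L p cb := (A_iff_feas L _ p cb hcb0 (by omega)).mp hA
    obtain ⟨c, hc, hfc⟩ := exists_feas_candidate L p cb.toNat cb rfl hf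
    refine ⟨p, by cases p <;> simp, c, ?_, (B_iff_feas L p c).mpr hfc⟩
    simpa [candOf, loOf] using hc
  · rintro ⟨p, -, c, hc, hB⟩
    have hf : Feas L p c := (B_iff_feas L p c).mp hB
    exact ⟨c, ⟨hf.1, by have := hf.2.1; omega⟩, p, by cases p <;> simp,
      (A_iff_feas L _ p c hf.1 hf.2.1).mpr hf⟩
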